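-- pv_equiv track=rewrite | github.com/wubo0067/ai-app-hub | vmcore-analysis-agent/src/react/output_parser.py | _normalize_invalid_escapes
-- ===== SOURCE A (Python) =====
-- def _normalize_invalid_escapes(content_str: str) -> str:
--     """修复 JSON 中的无效转义字符。
--
--     Args:
--         content_str: 原始字符串
--
--     Returns:
--         str: 修复后的字符串
--
--     修复的转义：
--         \| -> |
--         \/ -> /
--         \> -> >
--         \< -> <
--         \& -> &
--     """
--     invalid_escapes = [
--         (r"\|", "|"),
--         (r"\/", "/"),
--         (r"\>", ">"),
--         (r"\<", "<"),
--         (r"\&", "&"),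
--     ]
--     fixed_content = content_str
--     for pattern, replacement in invalid_escapes:
--         fixed_content = fixed_content.replace(pattern, replacement)
--     return fixed_content
-- ===== SOURCE B (Python) =====
-- def _normalize_invalid_escapes(content_str: str) -> str:
--     """Single left-to-right scan: drop a backslash that precedes |, /, >, < or &."""
--     specials = "|/><&"
--     out = []
--     i = 0
--     n = len(content_str)
--     while i < n:
--         ch = content_str[i]
--         if ch == "\\" and i + 1 < n and content_str[i + 1] in specials:
--             out.append(content_str[i + 1])
--             i += 2
--         else:
--             out.append(ch)
--             i += 1
--     return "".join(out)
-- ===== Notes on version B (the rewrite author's own statement) =====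
-- stated objective: simpler
-- what changed: Replaced A's five sequential str.replace passes (one pass per escaped character) by a single left-to-right scan that drops a backslash whenever the next character is one of |, /, >, <, &.
import Mathlib
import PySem

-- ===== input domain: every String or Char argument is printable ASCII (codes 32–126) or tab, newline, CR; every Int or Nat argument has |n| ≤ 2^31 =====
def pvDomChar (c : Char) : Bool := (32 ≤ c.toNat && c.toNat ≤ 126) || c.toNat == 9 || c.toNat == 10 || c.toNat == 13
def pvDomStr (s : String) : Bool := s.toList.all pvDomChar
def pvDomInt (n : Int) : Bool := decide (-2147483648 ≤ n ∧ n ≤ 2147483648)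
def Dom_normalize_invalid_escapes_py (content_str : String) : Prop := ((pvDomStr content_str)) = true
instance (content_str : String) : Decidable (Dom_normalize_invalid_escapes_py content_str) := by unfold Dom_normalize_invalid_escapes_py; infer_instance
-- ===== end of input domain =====

-- B replaces A's five sequential str.replace passes by one left-to-right scan (simpler: one traversal, one output buffer); equal output proved on all of Dom.

-- ===== PORT A =====
-- the list of (pattern, replacement) pairs and the for-loop over it, as in A
def normalize_invalid_escapes_py (content_str : String) : String :=
  [("\\|", "|"), ("\\/", "/"), ("\\>", ">"), ("\\<", "<"), ("\\&", "&")].foldl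
    (fun fixed_content pr => PySem.Str.replace fixed_content pr.1 pr.2) content_str

-- ===== PORT B =====
-- Source B's specials string
def pvSpecials : String := "|/><&"

-- Source B's while-loop: look at the current char and (when present) the next one;
-- on '\' followed by a special emit the special and advance 2, else emit and advance 1
def pvScan : List Char → List Char
  | [] => []
  | [c] => [c]
  | c :: d :: t =>
    if c = '\\' && pvSpecials.toList.contains d then d :: pvScan t
    else c :: pvScan (d :: t)

def normalize_invalid_escapes_py_alt (content_str : String) : String :=
  String.ofList (pvScan content_str.toList)

-- ===== PRECONDITION & SPEC =====
def Spec_normalize_invalid_escapes_py (content_str : String) (out : String) : Prop := out = normalize_invalid_escapes_py_alt content_str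
instance (content_str : String) (out : String) : Decidable (Spec_normalize_invalid_escapes_py content_str out) := by unfold Spec_normalize_invalid_escapes_py; infer_instance

-- ===== CLAIM (what is proved, stated in full; the proofs are below) =====
def Claim_equal_normalize_invalid_escapes_py : Prop := ∀ (content_str : String), Dom_normalize_invalid_escapes_py content_str → Spec_normalize_invalid_escapes_py content_str (normalize_invalid_escapes_py content_str)

-- ===== LEMMAS AND PROOFS =====

-- generic one-pass scan over an arbitrary predicate of "special" characters
def scanP (P : Char → Bool) : List Char → List Char
  | [] => []
  | [c] => [c]
  | c :: d :: t => if c = '\\' && P d then d :: scanP P t else c :: scanP P (d :: t)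

theorem scanP_congr (P Q : Char → Bool) (h : ∀ d, P d = Q d) :
    ∀ l, scanP P l = scanP Q l := by
  intro l
  induction l using scanP.induct P with
  | case1 => rfl
  | case2 c => rfl
  | case3 c d t hc ih =>
      simp only [Bool.and_eq_true, decide_eq_true_eq] at hc
      have hq : Q d = true := (h d) ▸ hc.2
      simp [scanP, hc.1, hc.2, hq, ih]
  | case4 c d t hc ih =>
      simp only [Bool.and_eq_true, decide_eq_true_eq] at hc
      have hq : ¬(c = '\\' ∧ Q d = true) := by rw [← h d]; exact hc
      simp [scanP, hc, hq, ih]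

theorem pvScan_eq_scanP (l : List Char) :
    pvScan l = scanP (fun d => pvSpecials.toList.contains d) l := by
  induction l using pvScan.induct with
  | case1 => rfl
  | case2 c => rfl
  | case3 c d t hc ih =>
      simp only [pvScan, scanP]
      rw [if_pos hc, if_pos hc, ih]
  | case4 c d t hc ih =>
      simp only [pvScan, scanP]
      rw [if_neg hc, if_neg hc, ih]

-- a cons is copied through scanP whenever the pair (head, next) does not fire
theorem scanP_cons (P : Char → Bool) (a : Char) (l : List Char)
    (h : ∀ d, l.head? = some d → ¬(a = '\\' ∧ P d = true)) :
    scanP P (a :: l) = a :: scanP P l := by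
  cases l with
  | nil => rfl
  | cons d t =>
    have := h d rfl
    simp only [scanP]
    rw [if_neg]
    simp only [Bool.and_eq_true, decide_eq_true_eq]
    tauto

-- the head of a scanP result is the head of the input or a special character
theorem head_scanP (P : Char → Bool) (l : List Char) :
    (scanP P l).head? = l.head? ∨ ∃ d, P d = true ∧ (scanP P l).head? = some d := by
  cases l with
  | nil => left; rfl
  | cons a l' =>
    cases l' with
    | nil => left; rfl
    | cons d t =>
      simp only [scanP]
      split_ifs with h
      · simp only [Bool.and_eq_true] at h
        right; exact ⟨d, h.2, rfl⟩
      · left; rfl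

-- Chars.replace with pattern "\c" IS the one-pass scan for the single special c
theorem replace_go_eq_scanP (c : Char) :
    ∀ (fuel : Nat) (l acc : List Char), l.length ≤ fuel →
      PySem.Chars.replace.go ['\\', c] [c] fuel l acc = acc.reverse ++ scanP (· == c) l := by
  intro fuel
  induction fuel with
  | zero =>
    intro l acc h
    have : l = [] := List.eq_nil_of_length_eq_zero (Nat.le_zero.mp h)
    subst this
    rw [PySem.Chars.replace.go.eq_def]; rfl
  | succ n ih =>
    intro l acc h
    cases l with
    | nil => rw [PySem.Chars.replace.go.eq_def]; simp [scanP]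
    | cons a t =>
      rw [PySem.Chars.replace.go.eq_def]
      simp only []
      by_cases hp : List.isPrefixOf ['\\', c] (a :: t) = true
      · rw [if_pos hp]
        -- the prefix test fires iff a = '\' and t = c :: t'
        cases t with
        | nil => simp [List.isPrefixOf] at hp
        | cons d t' =>
          simp only [List.isPrefixOf, Bool.and_eq_true, beq_iff_eq] at hp
          obtain ⟨ha, hd, -⟩ := hp
          subst ha; subst hd
          have hlen : t'.length ≤ n := by simp at h; omega
          have hd2 : List.drop (['\\', c].length) ('\\' :: c :: t') = t' := rfl
          rw [hd2, ih _ _ hlen]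
          simp [scanP]
      · rw [if_neg hp]
        have hlen : t.length ≤ n := by simp at h; omega
        rw [ih _ _ hlen]
        cases t with
        | nil => simp [scanP]
        | cons d t' =>
          have : ¬(a = '\\' ∧ (d == c) = true) := by
            intro ⟨h1, h2⟩
            apply hp
            simp [List.isPrefixOf, h1, beq_iff_eq.mp h2]
          rw [scanP_cons (· == c) a (d :: t') (by intro e he; simp at he; subst he; exact this)]
          simp

theorem replace_eq_scanP (c : Char) (s : List Char) :
    PySem.Chars.replace s ['\\', c] [c] = scanP (· == c) s := by
  unfold PySem.Chars.replace
  rw [if_neg (by simp)]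
  simpa using replace_go_eq_scanP c s.length s [] (le_refl _)

-- KEY LEMMA: running the single-special scan for c after a scan for P is the scan for P-or-c
theorem scanP_scanP (P : Char → Bool) (c : Char)
    (hbs : P '\\' = false) (hcbs : c ≠ '\\') (hPc : P c = false) :
    ∀ (n : Nat) (s : List Char), s.length ≤ n →
      scanP (· == c) (scanP P s) = scanP (fun d => P d || d == c) s := by
  intro n
  induction n with
  | zero =>
    intro s h
    have : s = [] := List.eq_nil_of_length_eq_zero (Nat.le_zero.mp h)
    subst this; rfl
  | succ n ih =>
    intro s h
    rcases s with _ | ⟨a, _ | ⟨d, t⟩⟩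
    · rfl
    · rfl
    · have ht : t.length ≤ n := by simp at h; omega
      have hdt : (d :: t).length ≤ n := by simp at h ⊢; omega
      by_cases hfire : a = '\\' ∧ P d = true
      · obtain ⟨ha, hPd⟩ := hfire
        have hd : d ≠ '\\' := fun hdd => by rw [hdd] at hPd; rw [hbs] at hPd; exact Bool.false_ne_true hPd
        have hdc : d ≠ c := fun hdd => by rw [hdd] at hPd; rw [hPc] at hPd; exact Bool.false_ne_true hPd
        have l1 : scanP P (a :: d :: t) = d :: scanP P t := by
          simp [scanP, ha, hPd]
        have r1 : scanP (fun d' => P d' || d' == c) (a :: d :: t) = d :: scanP (fun d' => P d' || d' == c) t := by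
          simp [scanP, ha, hPd]
        rw [l1, r1, scanP_cons _ _ _ (by intro e he hcon; exact hd hcon.1), ih t ht]
      · have l1 : scanP P (a :: d :: t) = a :: scanP P (d :: t) := by
          simp only [scanP]
          rw [if_neg]
          simp only [Bool.and_eq_true, decide_eq_true_eq]
          tauto
        by_cases ha : a = '\\'
        · have hPd : P d = false := by
            cases hv : P d
            · rfl
            · exact absurd ⟨ha, hv⟩ hfire
          by_cases hdc : d = c
          · -- a = '\', d = c : A's pass for c fires on the copied-through pair
            have l2 : scanP P (d :: t) = d :: scanP P t :=
              scanP_cons _ _ _ (by intro e he hcon; exact hcbs (hdc ▸ hcon.1))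
            rw [l1, l2, ha, hdc]
            have lhs : scanP (· == c) ('\\' :: c :: scanP P t) = c :: scanP (· == c) (scanP P t) := by
              simp [scanP]
            rw [lhs, ih t ht]
            have r1 : scanP (fun d' => P d' || d' == c) ('\\' :: c :: t)
                = c :: scanP (fun d' => P d' || d' == c) t := by
              simp [scanP]
            rw [r1]
          · -- a = '\', d neither special-so-far nor c : the backslash is copied by both
            subst ha
            have hhead : ∀ e, (scanP P (d :: t)).head? = some e → ¬('\\' = '\\' ∧ (e == c) = true) := by
              intro e he hcon
              have hec : e = c := beq_iff_eq.mp hcon.2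
              subst hec
              rcases head_scanP P (d :: t) with h1 | ⟨d', hd', h2⟩
              · rw [he] at h1; simp at h1; exact hdc h1.symm
              · rw [he] at h2; simp at h2; subst h2; rw [hPc] at hd'; exact Bool.false_ne_true hd'
            rw [l1, scanP_cons _ _ _ hhead, ih (d :: t) hdt]
            have r1 : scanP (fun d' => P d' || d' == c) ('\\' :: d :: t)
                = '\\' :: scanP (fun d' => P d' || d' == c) (d :: t) := by
              apply scanP_cons
              intro e he hcon
              simp at he; subst he
              rcases Bool.or_eq_true_iff.mp hcon.2 with h1 | h2
              · rw [hPd] at h1; exact Bool.false_ne_true h1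
              · exact hdc (beq_iff_eq.mp h2)
            rw [r1]
        · -- ordinary character: copied by every pass
          have hhead : ∀ e, (scanP P (d :: t)).head? = some e → ¬(a = '\\' ∧ (e == c) = true) :=
            fun e he hcon => ha hcon.1
          rw [l1, scanP_cons _ _ _ hhead, ih (d :: t) hdt]
          exact (scanP_cons _ _ _ (fun e he hcon => ha hcon.1)).symm

-- the five sequential passes, folded together one at a time
theorem five_passes (s : List Char) :
    scanP (· == '&') (scanP (· == '<') (scanP (· == '>') (scanP (· == '/') (scanP (· == '|') s)))) =
      scanP (fun d => pvSpecials.toList.contains d) s := by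
  have h1 := scanP_scanP (· == '|') '/' (by decide) (by decide) (by decide) s.length s (le_refl _)
  have h2 := scanP_scanP (fun d => (d == '|') || d == '/') '>' (by decide) (by decide) (by decide) s.length s (le_refl _)
  have h3 := scanP_scanP (fun d => ((d == '|') || d == '/') || d == '>') '<' (by decide) (by decide) (by decide) s.length s (le_refl _)
  have h4 := scanP_scanP (fun d => (((d == '|') || d == '/') || d == '>') || d == '<') '&' (by decide) (by decide) (by decide) s.length s (le_refl _)
  simp only [h1, h2, h3, h4]
  apply scanP_congr
  intro d
  have hsp : pvSpecials.toList = ['|', '/', '>', '<', '&'] := by decide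
  rw [hsp]
  cases h1 : d == '|' <;> cases h2 : d == '/' <;> cases h3 : d == '>' <;> cases h4 : d == '<' <;>
    cases h5 : d == '&' <;> simp_all

-- ===== VERDICT (by name: the statement is the Claim_ definition above) =====
theorem normalize_invalid_escapes_py_spec : Claim_equal_normalize_invalid_escapes_py := by
  intro content_str _
  unfold Spec_normalize_invalid_escapes_py normalize_invalid_escapes_py normalize_invalid_escapes_py_alt
  simp only [List.foldl]
  apply String.toList_inj.mp
  rw [pvScan_eq_scanP]
  simp only [PySem.Str.toList_replace]
  rw [show ("\\|" : String).toList = ['\\', '|'] from by decide,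
      show ("|" : String).toList = ['|'] from by decide,
      show ("\\/" : String).toList = ['\\', '/'] from by decide,
      show ("/" : String).toList = ['/'] from by decide,
      show ("\\>" : String).toList = ['\\', '>'] from by decide,
      show (">" : String).toList = ['>'] from by decide,
      show ("\\<" : String).toList = ['\\', '<'] from by decide,
      show ("<" : String).toList = ['<'] from by decide,
      show ("\\&" : String).toList = ['\\', '&'] from by decide,
      show ("&" : String).toList = ['&'] from by decide]
  rw [replace_eq_scanP '|', replace_eq_scanP '/', replace_eq_scanP '>',
      replace_eq_scanP '<', replace_eq_scanP '&']
  rw [five_passes]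
  simp
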